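-- pv_equiv track=rewrite | github.com/MeridianAlgo/No-Ticker-Left-Behind | src/build_global_universe.py | _suggest_exchange_code
-- ===== SOURCE A (Python) =====
-- from typing import Dict, Iterable, List, Optional, Set, Tuple
--
-- def _suggest_exchange_code(exchanges: List[Dict[str, str]], wanted: str) -> Optional[str]:
--     w = wanted.strip().lower()
--     # Try exact code match
--     for d in exchanges:
--         if str(d.get("Code", "")).strip().lower() == w:
--             return str(d.get("Code", "")).strip().upper()
--     # Try by name contains
--     for d in exchanges:
--         name = str(d.get("Name", "")).lower()
--         if w and w in name:
--             return str(d.get("Code", "")).strip().upper()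
--     return None
-- ===== SOURCE B (Python) =====
-- from typing import Dict, List, Optional
--
-- def _suggest_exchange_code(exchanges: List[Dict[str, str]], wanted: str) -> Optional[str]:
--     w = wanted.strip().lower()
--     fallback = None
--     for d in exchanges:
--         code = str(d.get("Code", "")).strip()
--         if code.lower() == w:
--             return code.upper()
--         if fallback is None and w and w in str(d.get("Name", "")).lower():
--             fallback = code.upper()
--     return fallback
-- ===== Notes on version B (the rewrite author's own statement) =====
-- stated objective: alternative
-- what changed: Replaces A's two sequential scans (exact-code pass, then name-substring pass) with a single pass that returns immediately on an exact code match and records the first name match in a fallback variable returned after the loop.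
import Mathlib
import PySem

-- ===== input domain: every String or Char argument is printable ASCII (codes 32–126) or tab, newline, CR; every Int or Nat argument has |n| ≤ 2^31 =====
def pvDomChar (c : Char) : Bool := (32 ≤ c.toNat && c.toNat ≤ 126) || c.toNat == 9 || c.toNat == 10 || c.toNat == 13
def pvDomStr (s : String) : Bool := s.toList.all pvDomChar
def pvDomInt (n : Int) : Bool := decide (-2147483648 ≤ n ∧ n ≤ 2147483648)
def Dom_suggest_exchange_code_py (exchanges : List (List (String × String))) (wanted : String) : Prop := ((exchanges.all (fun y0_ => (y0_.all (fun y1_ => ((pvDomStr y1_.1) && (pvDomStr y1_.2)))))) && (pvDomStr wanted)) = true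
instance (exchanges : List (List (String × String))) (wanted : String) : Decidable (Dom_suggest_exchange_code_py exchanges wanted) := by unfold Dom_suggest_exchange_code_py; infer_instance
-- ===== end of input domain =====

-- B replaces A's two sequential scans by one pass with a fallback variable (same results, one traversal).

-- ===== PORT A =====
-- first loop: exact code match
def pvALoop1 (w : String) : List (List (String × String)) → Option String
  | [] => none
  | d :: rest =>
    if PySem.Str.lower (PySem.Str.strip (PySem.Dict.getD (PySem.Dict.mk d) "Code" "")) == w then
      some (PySem.Str.upper (PySem.Str.strip (PySem.Dict.getD (PySem.Dict.mk d) "Code" "")))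
    else pvALoop1 w rest

-- second loop: name contains
def pvALoop2 (w : String) : List (List (String × String)) → Option String
  | [] => none
  | d :: rest =>
    let name := PySem.Str.lower (PySem.Dict.getD (PySem.Dict.mk d) "Name" "")
    if w != "" && PySem.Str.isIn w name then
      some (PySem.Str.upper (PySem.Str.strip (PySem.Dict.getD (PySem.Dict.mk d) "Code" "")))
    else pvALoop2 w rest

def suggest_exchange_code_py (exchanges : List (List (String × String))) (wanted : String) : Option String :=
  let w := PySem.Str.lower (PySem.Str.strip wanted)
  match pvALoop1 w exchanges with
  | some r => some r
  | none =>
    match pvALoop2 w exchanges with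
    | some r => some r
    | none => none

-- ===== PORT B =====
-- single pass carrying the fallback accumulator
def pvBLoop (w : String) (fallback : Option String) : List (List (String × String)) → Option String
  | [] => fallback
  | d :: rest =>
    let code := PySem.Str.strip (PySem.Dict.getD (PySem.Dict.mk d) "Code" "")
    if PySem.Str.lower code == w then
      some (PySem.Str.upper code)
    else
      let fallback' :=
        if fallback.isNone && w != "" &&
            PySem.Str.isIn w (PySem.Str.lower (PySem.Dict.getD (PySem.Dict.mk d) "Name" "")) then
          some (PySem.Str.upper code)
        else fallback
      pvBLoop w fallback' rest

def suggest_exchange_code_py_alt (exchanges : List (List (String × String))) (wanted : String) : Option String :=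
  pvBLoop (PySem.Str.lower (PySem.Str.strip wanted)) none exchanges

-- ===== PRECONDITION & SPEC =====
def Spec_suggest_exchange_code_py (exchanges : List (List (String × String))) (wanted : String) (out : Option String) : Prop := out = suggest_exchange_code_py_alt exchanges wanted
instance (exchanges : List (List (String × String))) (wanted : String) (out : Option String) : Decidable (Spec_suggest_exchange_code_py exchanges wanted out) := by unfold Spec_suggest_exchange_code_py; infer_instance

-- ===== CLAIM (what is proved, stated in full; the proofs are below) =====
def Claim_equal_suggest_exchange_code_py : Prop := ∀ (exchanges : List (List (String × String))) (wanted : String), Dom_suggest_exchange_code_py exchanges wanted → Spec_suggest_exchange_code_py exchanges wanted (suggest_exchange_code_py exchanges wanted)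

-- ===== LEMMAS AND PROOFS =====
-- Invariant of the single pass: if an exact match exists it wins, otherwise the
-- carried fallback (if any) is returned, otherwise the first name match.
theorem pvBLoop_eq (w : String) (xs : List (List (String × String))) (fb : Option String) :
    pvBLoop w fb xs =
      match pvALoop1 w xs with
      | some r => some r
      | none =>
        match fb with
        | some f => some f
        | none => pvALoop2 w xs := by
  induction xs generalizing fb with
  | nil => cases fb <;> simp [pvBLoop, pvALoop1, pvALoop2]
  | cons d rest ih =>
    simp only [pvBLoop, pvALoop1, pvALoop2]
    by_cases h1 : (PySem.Str.lower (PySem.Str.strip (PySem.Dict.getD (PySem.Dict.mk d) "Code" "")) == w) = true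
    · simp [h1]
    · cases hb : (w != "" && PySem.Str.isIn w (PySem.Str.lower (PySem.Dict.getD (PySem.Dict.mk d) "Name" ""))) <;>
        cases fb <;> simp [h1, hb, ih]
      · split_ifs with hc
        · simp [hc.1, hc.2] at hb
        · rfl
      · split_ifs with hc
        · rfl
        · simp at hb
          simp [hb.1, hb.2] at hc

-- ===== VERDICT (by name: the statement is the Claim_ definition above) =====
theorem suggest_exchange_code_py_spec : Claim_equal_suggest_exchange_code_py := by
  intro exchanges wanted _
  unfold Spec_suggest_exchange_code_py suggest_exchange_code_py suggest_exchange_code_py_alt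
  rw [pvBLoop_eq]
  cases h : pvALoop1 (PySem.Str.lower (PySem.Str.strip wanted)) exchanges with
  | some r => simp [h]
  | none =>
    cases h2 : pvALoop2 (PySem.Str.lower (PySem.Str.strip wanted)) exchanges <;> simp [h, h2]
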